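-- pv_equiv track=rewrite | github.com/hwgao/coding-challenge | python/keypad_string.py | keypad_string
-- ===== SOURCE A (Python) =====
-- key_to_letters = {
--     "1": "",
--     "2": "abc",
--     "3": "def",
--     "4": "ghi",
--     "5": "jkl",
--     "6": "mno",
--     "7": "pqrs",
--     "8": "tuv",
--     "9": "wxyz",
--     "0": " ",
-- }
--
-- def keypad_string(keys: str) -> str:
--     '''
--     Find the string that is created using a standard phone keypad
--     >>> keypad_string("12345")
--     'adgj'
--     >>> keypad_string("4433555555666")
--     'hello'
--     >>> keypad_string("2022")
--     'a b'
--     >>> keypad_string("")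
--     ''
--     >>> keypad_string("111")
--     ''
--     >>> keypad_string("*")
--     Traceback (most recent call last):
--     ...
--     AssertionError: Invalid key
--     '''
--     ret = ""
--     i = 0
--     while i < len(keys):
--         assert ord("0") <= ord(keys[i]) and ord(
--             keys[i]) <= ord("9"), "Invalid key"
--         letters = len(key_to_letters[keys[i]])
--         if len(keys) > i + 1 and keys[i] == keys[i+1] and letters > 1:
--             if len(keys) > i + 2 and keys[i + 1] == keys[i+2] and letters > 2:
--                 if len(keys) > i + 3 and keys[i + 2] == keys[i+3] and letters > 3:
--                     ret += key_to_letters[keys[i]][3]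
--                     i += 3
--                 else:
--                     ret += key_to_letters[keys[i]][2]
--                     i += 2
--             else:
--                 ret += key_to_letters[keys[i]][1]
--                 i += 1
--         else:
--             if letters > 0:
--                 ret += key_to_letters[keys[i]][0]
--         i += 1
--
--     return ret
-- ===== SOURCE B (Python) =====
-- key_to_letters = {
--     "1": "",
--     "2": "abc",
--     "3": "def",
--     "4": "ghi",
--     "5": "jkl",
--     "6": "mno",
--     "7": "pqrs",
--     "8": "tuv",
--     "9": "wxyz",
--     "0": " ",
-- }
--
-- def keypad_string(keys: str) -> str:
--     out = []
--     i = 0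
--     n = len(keys)
--     while i < n:
--         c = keys[i]
--         assert "0" <= c <= "9", "Invalid key"
--         j = i
--         while j < n and keys[j] == c:
--             j += 1
--         L = j - i                      # length of the maximal run of c
--         letters = key_to_letters[c]
--         m = len(letters)
--         if m:
--             q, r = divmod(L, m)
--             out.append(letters[m - 1] * q)
--             if r:
--                 out.append(letters[r - 1])
--         i = j
--     return "".join(out)
-- ===== Notes on version B (the rewrite author's own statement) =====
-- stated objective: idiomatic
-- what changed: B splits the input into maximal runs of one digit and emits each run's output in closed form with divmod (L//m copies of the last letter plus one partial letter), replacing A's nested four-level if-chain that peels chunks character by character.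
import Mathlib
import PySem

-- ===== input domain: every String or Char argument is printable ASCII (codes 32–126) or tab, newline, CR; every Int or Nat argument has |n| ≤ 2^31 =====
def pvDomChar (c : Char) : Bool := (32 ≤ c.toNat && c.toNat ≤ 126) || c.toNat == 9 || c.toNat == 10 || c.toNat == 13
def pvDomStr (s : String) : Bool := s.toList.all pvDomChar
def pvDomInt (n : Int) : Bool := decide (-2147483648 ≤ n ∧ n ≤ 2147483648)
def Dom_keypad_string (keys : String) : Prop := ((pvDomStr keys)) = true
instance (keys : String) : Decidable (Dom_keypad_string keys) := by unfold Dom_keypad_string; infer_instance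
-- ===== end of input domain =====

-- B rewrites A's nested chunk-peeling if-chain as a run-length split with a divmod closed form per run
-- (objective: idiomatic); same O(n) cost, return value proved equal on all-digit inputs.

-- ===== PORT A =====

-- the module constant key_to_letters, as a lookup function on the (one-character) key
def kl (c : Char) : List Char :=
  if c = '1' then []
  else if c = '2' then ['a','b','c']
  else if c = '3' then ['d','e','f']
  else if c = '4' then ['g','h','i']
  else if c = '5' then ['j','k','l']
  else if c = '6' then ['m','n','o']
  else if c = '7' then ['p','q','r','s']
  else if c = '8' then ['t','u','v']
  else if c = '9' then ['w','x','y','z']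
  else if c = '0' then [' ']
  else []

-- A's while-loop; `ret` is the accumulator, the index i is represented by the remaining suffix.
-- `rest[k]? = some c` transcribes `len(keys) > i+k+1 and keys[i+k] == keys[i+k+1]` (under the
-- enclosing conditions keys[i..i+k] all equal c, so both say position i+k+1 exists and holds c).
-- On the assertion failure (non-digit) the port stops and returns ret; Pre_ excludes those inputs.
def keypadA (cs : List Char) (ret : List Char) : List Char :=
  match cs with
  | [] => ret
  | c :: rest =>
    if '0' ≤ c ∧ c ≤ '9' then
      if rest[0]? = some c ∧ 1 < (kl c).length then
        if rest[1]? = some c ∧ 2 < (kl c).length then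
          if rest[2]? = some c ∧ 3 < (kl c).length then
            keypadA (rest.drop 3) (ret ++ [(kl c).getD 3 ' '])
          else
            keypadA (rest.drop 2) (ret ++ [(kl c).getD 2 ' '])
        else
          keypadA (rest.drop 1) (ret ++ [(kl c).getD 1 ' '])
      else
        if 0 < (kl c).length then keypadA rest (ret ++ [(kl c).getD 0 ' '])
        else keypadA rest ret
    else ret
termination_by cs.length
decreasing_by all_goals simp [List.length_drop]

def keypad_string (keys : String) : String := String.ofList (keypadA keys.toList [])

-- ===== PORT B =====

-- B's outer while-loop; `out` is the list of pieces, joined at the end; the inner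
-- `while keys[j] == c` scan is takeWhile/dropWhile on the suffix.
def keypadB (cs : List Char) (out : List (List Char)) : List (List Char) :=
  match cs with
  | [] => out
  | c :: rest =>
    if '0' ≤ c ∧ c ≤ '9' then
      let L := (List.takeWhile (fun x => x = c) (c :: rest)).length
      let out' :=
        if (kl c).length ≠ 0 then
          let out1 := out ++ [List.replicate (L / (kl c).length) ((kl c).getD ((kl c).length - 1) ' ')]
          if L % (kl c).length ≠ 0 then out1 ++ [[(kl c).getD (L % (kl c).length - 1) ' ']] else out1
        else out
      keypadB (List.dropWhile (fun x => x = c) (c :: rest)) out'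
    else out
termination_by cs.length
decreasing_by
  simp only [List.dropWhile_cons, decide_true, if_true, List.length_cons]
  have := List.length_dropWhile_le (fun x => decide (x = c)) rest
  omega

def keypad_string_alt (keys : String) : String := String.ofList ((keypadB keys.toList []).flatten)

-- ===== PRECONDITION & SPEC =====
-- Pre_ excludes exactly the inputs containing a non-digit character, on which Python A
-- (and B alike) raises an AssertionError.
def Pre_keypad_string (keys : String) : Prop :=
  (keys.toList.all fun c => decide ('0' ≤ c) && decide (c ≤ '9')) = true
instance (keys : String) : Decidable (Pre_keypad_string keys) := by unfold Pre_keypad_string; infer_instance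
def pvWitness_keypad_string : String := "23"

def Spec_keypad_string (keys : String) (out : String) : Prop := out = keypad_string_alt keys
instance (keys : String) (out : String) : Decidable (Spec_keypad_string keys out) := by unfold Spec_keypad_string; infer_instance

-- ===== CLAIM (what is proved, stated in full; the proofs are below) =====
def Claim_equal_keypad_string : Prop := ∀ (keys : String), Dom_keypad_string keys → Pre_keypad_string keys → Spec_keypad_string keys (keypad_string keys)

-- ===== LEMMAS AND PROOFS =====

-- per-run output of A: chunks of size min(m, remaining), emitting letters[chunk-1]
def outRun (c : Char) (L : Nat) : List Char :=
  if (kl c).length = 0 then []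
  else if L = 0 then []
  else if (kl c).length ≤ L then
    (kl c).getD ((kl c).length - 1) ' ' :: outRun c (L - (kl c).length)
  else [(kl c).getD (L - 1) ' ']
termination_by L
decreasing_by omega

lemma kl_len_le (c : Char) : (kl c).length ≤ 4 := by
  unfold kl; split_ifs <;> simp

lemma keypadA_acc (n : Nat) : ∀ (cs ret : List Char), cs.length ≤ n →
    keypadA cs ret = ret ++ keypadA cs [] := by
  induction n with
  | zero =>
    intro cs ret h
    have hcs : cs = [] := List.eq_nil_of_length_eq_zero (Nat.le_zero.mp h)
    subst hcs; simp [keypadA]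
  | succ n ih =>
    intro cs ret h
    match cs with
    | [] => simp [keypadA]
    | c :: rest =>
      have hr : rest.length ≤ n := by simpa using h
      have hd1 : (rest.drop 1).length ≤ n := by rw [List.length_drop]; omega
      have hd2 : (rest.drop 2).length ≤ n := by rw [List.length_drop]; omega
      have hd3 : (rest.drop 3).length ≤ n := by rw [List.length_drop]; omega
      rw [keypadA, keypadA]
      split_ifs with h1 h2 h3 h4 h5
      · rw [ih _ (ret ++ [(kl c).getD 3 ' ']) hd3, ih _ ([] ++ [(kl c).getD 3 ' ']) hd3]; simp
      · rw [ih _ (ret ++ [(kl c).getD 2 ' ']) hd2, ih _ ([] ++ [(kl c).getD 2 ' ']) hd2]; simp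
      · rw [ih _ (ret ++ [(kl c).getD 1 ' ']) hd1, ih _ ([] ++ [(kl c).getD 1 ' ']) hd1]; simp
      · rw [ih _ (ret ++ [(kl c).getD 0 ' ']) hr, ih _ ([] ++ [(kl c).getD 0 ' ']) hr]; simp
      · exact ih _ _ hr
      · simp

lemma keypadB_acc (n : Nat) : ∀ (cs : List Char) (out : List (List Char)), cs.length ≤ n →
    keypadB cs out = out ++ keypadB cs [] := by
  induction n with
  | zero =>
    intro cs out h
    have hcs : cs = [] := List.eq_nil_of_length_eq_zero (Nat.le_zero.mp h)
    subst hcs; simp [keypadB]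
  | succ n ih =>
    intro cs out h
    match cs with
    | [] => simp [keypadB]
    | c :: rest =>
      have hr : rest.length ≤ n := by simpa using h
      have hd : (List.dropWhile (fun x => x = c) (c :: rest)).length ≤ n := by
        simp only [List.dropWhile_cons, decide_true, if_true]
        exact le_trans (List.length_dropWhile_le _ rest) hr
      have hd' : (List.dropWhile (fun x => decide (x = c)) rest).length ≤ n :=
        le_trans (List.length_dropWhile_le _ rest) hr
      rw [keypadB, keypadB]
      split_ifs with h1 h2
      · simp only [List.dropWhile_cons, List.takeWhile_cons, decide_true, if_true]
        split_ifs with h3 <;>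
          · conv_lhs => rw [ih _ _ hd']
            conv_rhs => rw [ih _ _ hd']
            simp
      · simp only [List.dropWhile_cons, decide_true, if_true]
        exact ih _ _ hd'
      · simp


lemma outRun_zero (c : Char) : outRun c 0 = [] := by
  rw [outRun]; simp

lemma outRun_mzero (c : Char) (hm : (kl c).length = 0) (L : Nat) : outRun c L = [] := by
  rw [outRun, if_pos hm]

lemma outRun_min (c : Char) (hm : (kl c).length ≠ 0) (L : Nat) (hL : 1 ≤ L) :
    outRun c L = (kl c).getD (min (kl c).length L - 1) ' ' ::
      outRun c (L - min (kl c).length L) := by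
  rw [outRun, if_neg hm, if_neg (by omega : ¬ L = 0)]
  by_cases hle : (kl c).length ≤ L
  · rw [if_pos hle, min_eq_left hle]
  · rw [if_neg hle, min_eq_right (by omega : L ≤ (kl c).length), Nat.sub_self, outRun_zero]

-- B's closed form equals outRun
lemma b_run (c : Char) (hm : (kl c).length ≠ 0) : ∀ (L : Nat),
    List.replicate (L / (kl c).length) ((kl c).getD ((kl c).length - 1) ' ') ++
      (if L % (kl c).length ≠ 0 then [(kl c).getD (L % (kl c).length - 1) ' '] else [])
    = outRun c L := by
  intro L
  induction L using Nat.strong_induction_on with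
  | _ L ih =>
    rw [outRun, if_neg hm]
    by_cases hL : L = 0
    · subst hL; simp
    · rw [if_neg hL]
      by_cases hle : (kl c).length ≤ L
      · rw [if_pos hle]
        obtain ⟨k, rfl⟩ : ∃ k, L = k + (kl c).length := ⟨L - (kl c).length, by omega⟩
        rw [Nat.add_div_right _ (Nat.pos_of_ne_zero hm), Nat.add_mod_right,
            List.replicate_succ, List.cons_append,
            ih k (by have := Nat.pos_of_ne_zero hm; omega), Nat.add_sub_cancel]
      · rw [if_neg hle, Nat.div_eq_of_lt (by omega), Nat.mod_eq_of_lt (by omega)]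
        simp [hL]

lemma keypadA_acc' (cs ret : List Char) : keypadA cs ret = ret ++ keypadA cs [] :=
  keypadA_acc cs.length cs ret le_rfl

-- one chunk step of A on a maximal run
lemma a_step (c : Char) (hdc : '0' ≤ c ∧ c ≤ '9') (L : Nat) (hL : 1 ≤ L)
    (tail : List Char) (h0 : tail[0]? ≠ some c) :
    keypadA (List.replicate L c ++ tail) [] =
      if (kl c).length = 0 then keypadA (List.replicate (L - 1) c ++ tail) []
      else (kl c).getD (min (kl c).length L - 1) ' ' ::
        keypadA (List.replicate (L - min (kl c).length L) c ++ tail) [] := by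
  have hm4 := kl_len_le c
  rcases L with _ | _ | _ | _ | n
  · omega
  all_goals simp only [List.replicate_succ, List.replicate_zero, List.cons_append,
      List.nil_append]
  -- L = 1
  · rw [keypadA, if_pos hdc, if_neg (fun h => h0 h.1)]
    by_cases hm : (kl c).length = 0
    · rw [if_neg (by omega : ¬ 0 < (kl c).length), if_pos hm]; simp
    · rw [if_pos (Nat.pos_of_ne_zero hm), if_neg hm, keypadA_acc']
      have e1 : min (kl c).length 1 - 1 = 0 := by omega
      have e2 : 1 - min (kl c).length 1 = 0 := by omega
      rw [e1, e2]; simp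
  -- L = 2
  · rw [keypadA, if_pos hdc]
    by_cases h1 : 1 < (kl c).length
    · rw [if_pos ⟨by simp, h1⟩,
          if_neg (fun h => h0 (by simpa using h.1))]
      rw [keypadA_acc', if_neg (by omega : ¬ (kl c).length = 0)]
      have e1 : min (kl c).length 2 - 1 = 1 := by omega
      have e2 : 2 - min (kl c).length 2 = 0 := by omega
      rw [e1, e2]; simp
    · rw [if_neg (fun h => h1 h.2)]
      by_cases hm : (kl c).length = 0
      · rw [if_neg (by omega : ¬ 0 < (kl c).length), if_pos hm]
      · rw [if_pos (Nat.pos_of_ne_zero hm), if_neg hm, keypadA_acc']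
        have e1 : min (kl c).length 2 - 1 = 0 := by omega
        have e2 : 2 - min (kl c).length 2 = 1 := by omega
        rw [e1, e2]; simp [List.replicate_succ]
  -- L = 3
  · rw [keypadA, if_pos hdc]
    by_cases h1 : 1 < (kl c).length
    · rw [if_pos ⟨by simp, h1⟩]
      by_cases h2 : 2 < (kl c).length
      · rw [if_pos ⟨by simp, h2⟩,
            if_neg (fun h => h0 (by simpa using h.1))]
        rw [keypadA_acc', if_neg (by omega : ¬ (kl c).length = 0)]
        have e1 : min (kl c).length 3 - 1 = 2 := by omega
        have e2 : 3 - min (kl c).length 3 = 0 := by omega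
        rw [e1, e2]; simp
      · rw [if_neg (fun h => h2 h.2)]
        rw [keypadA_acc', if_neg (by omega : ¬ (kl c).length = 0)]
        have e1 : min (kl c).length 3 - 1 = 1 := by omega
        have e2 : 3 - min (kl c).length 3 = 1 := by omega
        rw [e1, e2]; simp [List.replicate_succ]
    · rw [if_neg (fun h => h1 h.2)]
      by_cases hm : (kl c).length = 0
      · rw [if_neg (by omega : ¬ 0 < (kl c).length), if_pos hm]
      · rw [if_pos (Nat.pos_of_ne_zero hm), if_neg hm, keypadA_acc']
        have e1 : min (kl c).length 3 - 1 = 0 := by omega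
        have e2 : 3 - min (kl c).length 3 = 2 := by omega
        rw [e1, e2]; simp [List.replicate_succ]
  -- L = n + 4
  · rw [keypadA, if_pos hdc]
    by_cases h1 : 1 < (kl c).length
    · rw [if_pos ⟨by simp, h1⟩]
      by_cases h2 : 2 < (kl c).length
      · rw [if_pos ⟨by simp, h2⟩]
        by_cases h3 : 3 < (kl c).length
        · rw [if_pos ⟨by simp, h3⟩]
          rw [keypadA_acc', if_neg (by omega : ¬ (kl c).length = 0)]
          have e1 : min (kl c).length (n + 4) - 1 = 3 := by omega
          have e2 : n + 4 - min (kl c).length (n + 4) = n := by omega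
          rw [e1, e2]; simp
        · rw [if_neg (fun h => h3 h.2)]
          rw [keypadA_acc', if_neg (by omega : ¬ (kl c).length = 0)]
          have e1 : min (kl c).length (n + 4) - 1 = 2 := by omega
          have e2 : n + 4 - min (kl c).length (n + 4) = n + 1 := by omega
          rw [e1, e2]; simp [List.replicate_succ]
      · rw [if_neg (fun h => h2 h.2)]
        rw [keypadA_acc', if_neg (by omega : ¬ (kl c).length = 0)]
        have e1 : min (kl c).length (n + 4) - 1 = 1 := by omega
        have e2 : n + 4 - min (kl c).length (n + 4) = n + 2 := by omega
        rw [e1, e2]; simp [List.replicate_succ]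
    · rw [if_neg (fun h => h1 h.2)]
      by_cases hm : (kl c).length = 0
      · rw [if_neg (by omega : ¬ 0 < (kl c).length), if_pos hm]
        have e : n + 1 + 1 + 1 + 1 - 1 = n + 1 + 1 + 1 := by omega
        rw [e]; simp [List.replicate_succ]
      · rw [if_pos (Nat.pos_of_ne_zero hm), if_neg hm, keypadA_acc']
        have e1 : min (kl c).length (n + 4) - 1 = 0 := by omega
        have e2 : n + 4 - min (kl c).length (n + 4) = n + 3 := by omega
        rw [e1, e2]; simp [List.replicate_succ]

-- A consumes a maximal run of c, producing outRun
lemma a_run (c : Char) (hdc : '0' ≤ c ∧ c ≤ '9') :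
    ∀ (L : Nat) (tail : List Char), tail[0]? ≠ some c →
    keypadA (List.replicate L c ++ tail) [] = outRun c L ++ keypadA tail [] := by
  intro L
  induction L using Nat.strong_induction_on with
  | _ L ih =>
    intro tail h0
    by_cases hL : L = 0
    · subst hL; rw [outRun_zero]; simp
    · rw [a_step c hdc L (by omega) tail h0]
      by_cases hm : (kl c).length = 0
      · rw [if_pos hm, ih (L - 1) (by omega) tail h0, outRun_mzero c hm,
            outRun_mzero c hm]
      · have hmin : 1 ≤ min (kl c).length L := by
          have := Nat.pos_of_ne_zero hm; omega
        rw [if_neg hm, outRun_min c hm L (by omega),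
            ih (L - min (kl c).length L) (by omega) tail h0]
        simp

lemma keypadB_acc2 (cs : List Char) (out : List (List Char)) :
    keypadB cs out = out ++ keypadB cs [] :=
  keypadB_acc cs.length cs out le_rfl

lemma dropWhile_get0_ne (c : Char) : ∀ (l : List Char),
    (List.dropWhile (fun x => decide (x = c)) l)[0]? ≠ some c := by
  intro l
  induction l with
  | nil => simp
  | cons a t ih =>
    by_cases h : a = c
    · simpa [h] using ih
    · simp [List.dropWhile_cons, h]

lemma main_lemma (n : Nat) : ∀ (cs : List Char), cs.length ≤ n →
    (∀ c ∈ cs, '0' ≤ c ∧ c ≤ '9') →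
    keypadA cs [] = (keypadB cs []).flatten := by
  induction n with
  | zero =>
    intro cs h _
    have hcs : cs = [] := List.eq_nil_of_length_eq_zero (Nat.le_zero.mp h)
    subst hcs; simp [keypadA, keypadB]
  | succ n ih =>
    intro cs h hdig
    match cs with
    | [] => simp [keypadA, keypadB]
    | c :: rest =>
      have hdc : '0' ≤ c ∧ c ≤ '9' := hdig c (by simp)
      have hsplit := List.takeWhile_append_dropWhile
        (p := fun x => decide (x = c)) (l := c :: rest)
      have hrepl : List.takeWhile (fun x => decide (x = c)) (c :: rest) =
          List.replicate (List.takeWhile (fun x => decide (x = c)) (c :: rest)).length c :=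
        List.eq_replicate_length.mpr
          (fun b hb => by simpa using List.mem_takeWhile_imp hb)
      have hdh := dropWhile_get0_ne c (c :: rest)
      have hdlen : (List.dropWhile (fun x => decide (x = c)) (c :: rest)).length ≤ n := by
        have h1 : List.dropWhile (fun x => decide (x = c)) (c :: rest) =
            List.dropWhile (fun x => decide (x = c)) rest := by
          simp
        rw [h1]
        have := List.length_dropWhile_le (fun x => decide (x = c)) rest
        simp at h; omega
      have hddig : ∀ d ∈ List.dropWhile (fun x => decide (x = c)) (c :: rest),
          '0' ≤ d ∧ d ≤ '9' := fun d hd =>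
        hdig d ((List.dropWhile_sublist _).subset hd)
      have hIH := ih _ hdlen hddig
      -- A side
      have hA : keypadA (c :: rest) [] =
          outRun c (List.takeWhile (fun x => decide (x = c)) (c :: rest)).length ++
            keypadA (List.dropWhile (fun x => decide (x = c)) (c :: rest)) [] := by
        conv_lhs => rw [← hsplit, hrepl]
        exact a_run c hdc _ _ hdh
      rw [hA, hIH]
      -- B side
      rw [keypadB, if_pos hdc]
      dsimp only
      by_cases hm : (kl c).length = 0
      · rw [if_neg (by simpa using hm), outRun_mzero c hm]; simp
      · rw [if_pos (by simpa using hm),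
            ← b_run c hm (List.takeWhile (fun x => decide (x = c)) (c :: rest)).length]
        by_cases hr : (List.takeWhile (fun x => decide (x = c)) (c :: rest)).length %
            (kl c).length = 0
        · rw [if_neg (by simpa using hr), if_neg (by simpa using hr)]
          conv_rhs => rw [keypadB_acc2]
          simp
        · rw [if_pos (by simpa using hr), if_pos (by simpa using hr)]
          conv_rhs => rw [keypadB_acc2]
          simp

-- ===== VERDICT (by name: the statement is the Claim_ definition above) =====
theorem keypad_string_spec : Claim_equal_keypad_string := by
  intro keys _ hpre
  unfold Pre_keypad_string at hpre
  simp only [List.all_eq_true, Bool.and_eq_true, decide_eq_true_eq] at hpre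
  unfold Spec_keypad_string keypad_string keypad_string_alt
  exact congrArg String.ofList
    (main_lemma keys.toList.length keys.toList le_rfl (fun c hc => hpre c hc))
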